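-- pv_equiv track=rewrite | github.com/kh277/BOJ | 백준/Gold/17297. Messi Gimossi/Messi Gimossi.py | solve
-- ===== SOURCE A (Python) =====
-- def recur(N, DP, start, curIndex):
--     # 종료조건
--     if curIndex == 1:
--         return 'Messi'[N-start]
--     elif curIndex == 2:
--         return 'Messi Gimossi'[N-start]
--
--     # 분할정복
--     if start <= N < start + DP[curIndex-1]:
--         return recur(N, DP, start, curIndex-1)
--     elif N == start + DP[curIndex-1]:
--         return ' '
--     else:
--         return recur(N, DP, start+DP[curIndex-1]+1, curIndex-2)
--
-- def solve(N):
--     DP = [0 for _ in range(41)]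
--     DP[1] = 5
--     DP[2] = 13
--
--     # 2^30-1까지의 DP값 계산
--     breakPoint = 3
--     for i in range(3, 41):
--         DP[i] = DP[i-1] + DP[i-2] + 1
--         if DP[i] > N:
--             breakPoint = i
--             break
--
--     result = recur(N, DP, 0, breakPoint)
--     return 'Messi Messi Gimossi' if result == ' ' else result
-- ===== SOURCE B (Python) =====
-- def solve(N):
--     # grow the length table only as far as needed, then walk down iteratively
--     lens = [5, 13]                      # lens[i] = length of the (i+1)-th Messi string
--     while lens[-1] <= N:
--         lens.append(lens[-1] + lens[-2] + 1)
--     start = 0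
--     cur = len(lens)
--     while True:
--         if cur == 1:
--             ch = 'Messi'[N - start]
--             break
--         if cur == 2:
--             ch = 'Messi Gimossi'[N - start]
--             break
--         prev = lens[cur - 2]            # length of the (cur-1)-th string
--         if N < start + prev:
--             cur -= 1
--         elif N == start + prev:
--             ch = ' '
--             break
--         else:
--             start += prev + 1
--             cur -= 2
--     return 'Messi Messi Gimossi' if ch == ' ' else ch
-- ===== Notes on version B (the rewrite author's own statement) =====
-- stated objective: simpler
-- what changed: The fixed-size zero-initialised table with a break sentinel is replaced by a list grown exactly until its last length exceeds N, and the tail recursion over (start, curIndex) is replaced by a single iterative while loop over the same state.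
-- outside the precondition, e.g. on solve(-1): A raises IndexError, B returns 'i'; on solve(1119972817): A raises IndexError, B returns 'Messi Messi Gimossi'
import Mathlib
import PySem

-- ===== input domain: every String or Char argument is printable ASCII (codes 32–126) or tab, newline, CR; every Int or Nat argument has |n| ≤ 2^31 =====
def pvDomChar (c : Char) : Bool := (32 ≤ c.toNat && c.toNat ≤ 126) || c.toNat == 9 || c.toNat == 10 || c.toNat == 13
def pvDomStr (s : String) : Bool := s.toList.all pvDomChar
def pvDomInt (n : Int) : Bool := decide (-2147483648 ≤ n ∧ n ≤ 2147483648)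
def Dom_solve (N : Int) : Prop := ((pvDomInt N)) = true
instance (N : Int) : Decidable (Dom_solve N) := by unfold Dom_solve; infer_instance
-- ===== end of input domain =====

-- B replaces A's fixed-size table + tail recursion by a grow-as-needed table + one iterative while loop (same cost; return value only).

-- shared indexing helper: s[i] as a 1-char string; "" stands for Python's IndexError (excluded by Pre_)
def pyCharStr (s : String) (i : Int) : String :=
  match PySem.Str.pyGet? s i with
  | some c => String.ofList [c]
  | none => ""

-- ===== PORT A =====
def recurA (N : Int) (DP : List Int) : Int → Nat → String
  | start, 1 => pyCharStr "Messi" (N - start)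
  | start, 2 => pyCharStr "Messi Gimossi" (N - start)
  | start, (n+3) =>  -- curIndex = n+3; DP[curIndex-1] is DP[n+2]
    let d := PySem.List.pyGetD DP ((n : Int) + 2) 0
    if start ≤ N ∧ N < start + d then recurA N DP start (n+2)
    else if N = start + d then " "
    else recurA N DP (start + d + 1) (n+1)
  | _, 0 => ""  -- curIndex = 0: Python would recurse forever; unreachable from solve

def buildA (N : Int) (DP : List Int) (i : Nat) : List Int × Nat :=
  if _h : i < 41 then
    let DP' := DP.set i (DP.getD (i-1) 0 + DP.getD (i-2) 0 + 1)
    if N < DP'.getD i 0 then (DP', i)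
    else buildA N DP' (i+1)
  else (DP, 3)
termination_by 41 - i
decreasing_by omega

def solve (N : Int) : String :=
  let DP0 := ((List.replicate 41 (0 : Int)).set 1 5).set 2 13
  let p := buildA N DP0 3
  let result := recurA N p.1 0 p.2
  if result = " " then "Messi Messi Gimossi" else result

-- ===== PORT B =====
-- while lens[-1] <= N: lens.append(lens[-1] + lens[-2] + 1)   (fuel only makes the loop total; ample on the stated domain)
def growB (N : Int) (lens : List Int) : Nat → List Int
  | 0 => lens
  | fuel+1 =>
    if PySem.List.pyGetD lens (-1) 0 ≤ N then
      growB N (lens ++ [PySem.List.pyGetD lens (-1) 0 + PySem.List.pyGetD lens (-2) 0 + 1]) fuel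
    else lens

-- the while True loop over mutable (start, cur); each recursive call is one iteration
def loopB (N : Int) (lens : List Int) : Int → Nat → String
  | start, 1 => pyCharStr "Messi" (N - start)
  | start, 2 => pyCharStr "Messi Gimossi" (N - start)
  | start, (n+3) =>  -- cur = n+3; lens[cur-2] is lens[n+1]
    let prev := PySem.List.pyGetD lens ((n : Int) + 1) 0
    if N < start + prev then loopB N lens start (n+2)
    else if N = start + prev then " "
    else loopB N lens (start + prev + 1) (n+1)
  | _, 0 => ""  -- cur = 0: unreachable (len(lens) ≥ 2)

def solve_alt (N : Int) : String :=
  let lens := growB N [5, 13] 100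
  let ch := loopB N lens 0 lens.length
  if ch = " " then "Messi Messi Gimossi" else ch

-- ===== PRECONDITION & SPEC =====
-- Pre_ is exactly the set of inputs on which A returns: for negative N and for N ≥ 1119972817
-- (= the 40th length, beyond A's fixed-size table) A raises IndexError.
def Pre_solve (N : Int) : Prop := 0 ≤ N ∧ N < 1119972817
instance (N : Int) : Decidable (Pre_solve N) := by unfold Pre_solve; infer_instance
def pvWitness_solve : Int := (7)

def Spec_solve (N : Int) (out : String) : Prop := out = solve_alt N
instance (N : Int) (out : String) : Decidable (Spec_solve N out) := by unfold Spec_solve; infer_instance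

-- ===== CLAIM (what is proved, stated in full; the proofs are below) =====
def Claim_equal_solve : Prop := ∀ (N : Int), Dom_solve N → Pre_solve N → Spec_solve N (solve N)

-- ===== LEMMAS AND PROOFS =====

-- the mathematical length sequence: F i = length of the i-th Messi string
def F : Nat → Int
  | 0 => 0
  | 1 => 5
  | 2 => 13
  | (n+3) => F (n+2) + F (n+1) + 1

lemma F_rec (i : Nat) (h : 3 ≤ i) : F i = F (i-1) + F (i-2) + 1 := by
  obtain ⟨n, rfl⟩ : ∃ n, i = n + 3 := ⟨i - 3, by omega⟩
  simp [F]

lemma F40_val : F 40 = 1119972817 := by decide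

lemma mapF_getD (m j : Nat) (h : j < m) : ((List.range' 1 m).map F).getD j 0 = F (1+j) := by
  rw [List.getD_eq_getElem?_getD]; simp [h]

lemma range'_split (k : Nat) (h : 1 ≤ k) : List.range' 1 k = List.range' 1 (k-1) ++ [k] := by
  have := List.range'_concat (s := 1) (n := k - 1) (step := 1)
  rw [show k - 1 + 1 = k by omega] at this
  rw [this]; simp; omega

lemma getD_set_self (l : List Int) (i : Nat) (v : Int) (h : i < l.length) : (l.set i v).getD i 0 = v := by
  simp [List.getD_eq_getElem?_getD, List.getElem?_set_self h]

lemma getD_set_ne (l : List Int) (i j : Nat) (v : Int) (h : j ≠ i) : (l.set i v).getD j 0 = l.getD j 0 := by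
  simp [List.getD_eq_getElem?_getD, List.getElem?_set_ne (by omega : i ≠ j)]

-- A's table loop: it stops at the first index bp ≥ 3 with F bp > N, having filled DP with F up to bp
lemma buildA_spec (N : Int) (hN : N < 1119972817) :
    ∀ fuel i DP, 41 - i ≤ fuel → 3 ≤ i → i ≤ 40 → DP.length = 41 →
    (∀ j, j < i → DP.getD j 0 = F j) →
    (∀ j, 3 ≤ j → j < i → F j ≤ N) →
    ∃ bp DP', buildA N DP i = (DP', bp) ∧ 3 ≤ bp ∧ bp ≤ 40 ∧ N < F bp ∧
      (∀ j, 3 ≤ j → j < bp → F j ≤ N) ∧ DP'.length = 41 ∧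
      (∀ j, j ≤ bp → DP'.getD j 0 = F j) := by
  intro fuel
  induction fuel with
  | zero => intro i DP hf h3 h40 hlen hvals hprev; omega
  | succ fuel ih =>
    intro i DP hf h3 h40 hlen hvals hprev
    have hstep : DP.getD (i-1) 0 + DP.getD (i-2) 0 + 1 = F i := by
      rw [hvals (i-1) (by omega), hvals (i-2) (by omega), ← F_rec i h3]
    rw [buildA, dif_pos (by omega : i < 41)]
    simp only [hstep]
    have hset : (DP.set i (F i)).getD i 0 = F i := getD_set_self DP i (F i) (by omega)
    rw [hset]
    have hvals' : ∀ j, j < i + 1 → (DP.set i (F i)).getD j 0 = F j := by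
      intro j hj
      rcases Nat.lt_or_ge j i with h | h
      · rw [getD_set_ne DP i j (F i) (by omega)]; exact hvals j h
      · rw [show j = i by omega]; exact hset
    by_cases hc : N < F i
    · rw [if_pos hc]
      exact ⟨i, DP.set i (F i), rfl, h3, h40, hc, hprev, by simp [hlen], fun j hj => hvals' j (by omega)⟩
    · rw [if_neg hc]
      have hi40 : i ≠ 40 := by rintro rfl; rw [F40_val] at hc; omega
      exact ih (i+1) (DP.set i (F i)) (by omega) (by omega) (by omega) (by simp [hlen]) hvals'
        (fun j hj3 hji => by
          rcases Nat.lt_or_ge j i with h | h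
          · exact hprev j hj3 h
          · rw [show j = i by omega]; omega)

-- B's grow loop: starting from [F 1, …, F k] it returns [F 1, …, F m] with m the first index ≥ k with F m > N
lemma growB_spec (N : Int) (hN : N < 1119972817) :
    ∀ fuel k, 41 - k ≤ fuel → 2 ≤ k → k ≤ 40 →
    (∀ j, 2 ≤ j → j < k → F j ≤ N) →
    ∃ m, growB N ((List.range' 1 k).map F) fuel = (List.range' 1 m).map F ∧
      2 ≤ m ∧ m ≤ 40 ∧ N < F m ∧ (∀ j, 2 ≤ j → j < m → F j ≤ N) := by
  intro fuel
  induction fuel with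
  | zero => intro k hf h2 h40 hprev; omega
  | succ fuel ih =>
    intro k hf h2 h40 hprev
    have hsplit : (List.range' 1 k).map F = (List.range' 1 (k-1)).map F ++ [F k] := by
      rw [range'_split k (by omega)]; simp
    have hlast : PySem.List.pyGetD ((List.range' 1 k).map F) (-1) 0 = F k := by
      rw [hsplit]; exact PySem.List.pyGetD_neg_one_append_singleton _ _ _
    have hlen : ((List.range' 1 k).map F).length = k := by simp
    have hprev2 : PySem.List.pyGetD ((List.range' 1 k).map F) (-2) 0 = F (k-1) := by
      rw [PySem.List.pyGetD_neg_ofNat _ 2 0 (by omega) (by omega)]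
      simp only [List.getElem_map, List.getElem_range', hlen]
      congr 1
      omega
    rw [growB, hlast, hprev2]
    by_cases hc : F k ≤ N
    · rw [if_pos hc]
      have hk40 : k ≠ 40 := by rintro rfl; rw [F40_val] at hc; omega
      have happ : (List.range' 1 k).map F ++ [F k + F (k-1) + 1] = (List.range' 1 (k+1)).map F := by
        rw [range'_split (k+1) (by omega)]
        simp only [Nat.add_sub_cancel, List.map_append, List.map_cons, List.map_nil]
        rw [F_rec (k+1) (by omega), show k+1-1 = k by omega, show k+1-2 = k-1 by omega]
      rw [happ]
      obtain ⟨m, hg, hm⟩ := ih (k+1) (by omega) (by omega) (by omega)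
        (fun j hj2 hjk => by
          rcases Nat.lt_or_ge j k with h | h
          · exact hprev j hj2 h
          · rw [show j = k by omega]; exact hc)
      exact ⟨m, hg, hm⟩
    · rw [if_neg hc]
      exact ⟨k, rfl, h2, h40, by omega, hprev⟩

-- the recursion and the while loop walk the same (start, cur) states when the two tables agree on the consulted entries
lemma bridge (N : Int) (DP lens : List Int) :
    ∀ (cur : Nat) (start : Int), start ≤ N →
    (∀ j : Nat, 3 ≤ j → j ≤ cur →
      PySem.List.pyGetD DP ((j : Int) - 1) 0 = PySem.List.pyGetD lens ((j : Int) - 2) 0) →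
    recurA N DP start cur = loopB N lens start cur := by
  intro cur
  induction cur using Nat.strong_induction_on with
  | _ cur ih =>
    intro start hle hyp
    match cur with
    | 0 => rfl
    | 1 => rfl
    | 2 => rfl
    | (n+3) =>
      have hd := hyp (n+3) (by omega) le_rfl
      push_cast at hd
      rw [show (n : Int) + 3 - 1 = (n:Int) + 2 by ring, show (n : Int) + 3 - 2 = (n:Int) + 1 by ring] at hd
      simp only [recurA, loopB, ← hd]
      set d := PySem.List.pyGetD DP ((n : Int) + 2) 0 with hdd
      by_cases hlt : N < start + d
      · rw [if_pos ⟨hle, hlt⟩, if_pos hlt]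
        exact ih (n+2) (by omega) start hle (fun j h3 hj => hyp j h3 (by omega))
      · rw [if_neg (by tauto), if_neg hlt]
        by_cases heq : N = start + d
        · rw [if_pos heq, if_pos heq]
        · rw [if_neg heq, if_neg heq]
          exact ih (n+1) (by omega) (start + d + 1) (by omega)
            (fun j h3 hj => hyp j h3 (by omega))

-- ===== VERDICT (by name: the statement is the Claim_ definition above) =====
theorem solve_spec : Claim_equal_solve := by
  intro N _ hPre
  obtain ⟨h0, hlt⟩ := hPre
  unfold Spec_solve solve solve_alt
  dsimp only
  obtain ⟨bp, DP', hbuild, hbp3, hbp40, hNbp, hprevA, _hlenA, hDPv⟩ :=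
    buildA_spec N hlt 38 3 (((List.replicate 41 (0:Int)).set 1 5).set 2 13) (by omega) (by omega)
      (by omega) (by decide)
      (by intro j hj; interval_cases j <;> decide)
      (by intro j hj3 hj; omega)
  obtain ⟨m, hgrow, hm2, hm40, hNm, hprevB⟩ :=
    growB_spec N hlt 100 2 (by omega) le_rfl (by omega) (fun j h2 hj => absurd hj (by omega))
  have h2eq : ([5, 13] : List Int) = (List.range' 1 2).map F := by decide
  rw [hbuild, h2eq, hgrow]
  have hlenm : ((List.range' 1 m).map F).length = m := by simp
  rw [hlenm]
  suffices hmain : recurA N DP' 0 bp = loopB N ((List.range' 1 m).map F) 0 m by rw [hmain]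
  by_cases h13 : N < 13
  · -- small N: bp = 3 but m = 2; recurA takes one step into the cur = 2 base case
    have hm : m = 2 := by
      by_contra h
      have := hprevB 2 le_rfl (by omega)
      rw [show F 2 = 13 by decide] at this; omega
    have hbp : bp = 3 := by
      by_contra h
      have := hprevA 3 le_rfl (by omega)
      rw [show F 3 = 19 by decide] at this; omega
    subst hm hbp
    have hidx : PySem.List.pyGetD DP' (((0 : Nat) : Int) + 2) 0 = 13 := by
      rw [show (((0 : Nat) : Int) + 2) = ((2 : Nat) : Int) by norm_num, PySem.List.pyGetD_natCast,
        hDPv 2 (by omega)]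
      decide
    show recurA N DP' 0 (0+3) = _
    simp only [recurA, hidx]
    rw [if_pos ⟨h0, by omega⟩]
    rfl
  · -- N ≥ 13: the two stopping indices coincide and the bridge lemma applies
    have hm3 : 3 ≤ m := by
      by_contra h
      rw [show m = 2 by omega, show F 2 = 13 by decide] at hNm; omega
    have hbpm : bp = m := by
      rcases lt_trichotomy bp m with h | h | h
      · have := hprevB bp (by omega) h; omega
      · exact h
      · have := hprevA m hm3 h; omega
    rw [hbpm]
    apply bridge N DP' ((List.range' 1 m).map F) m 0 h0
    intro j hj3 hjbp
    rw [show ((j : Int) - 1) = (((j - 1 : Nat)) : Int) by omega,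
        show ((j : Int) - 2) = (((j - 2 : Nat)) : Int) by omega,
        PySem.List.pyGetD_natCast, PySem.List.pyGetD_natCast,
        hDPv (j-1) (by omega), mapF_getD m (j-2) (by omega)]
    congr 1
    omega
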